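-- pv_equiv track=rewrite | github.com/ndam1207/mini-redis | app/utils.py | split_cmd
-- ===== SOURCE A (Python) =====
-- COMMANDS = ['PING', 'ECHO', 'SET', 'GET', 'REPLCONF', 'PSYNC', 'KEYS', 'INFO', 'CONFIG', 'WAIT', 'TYPE', 'XADD', 'REDIS0011']
--
-- def split_cmd(parsed):
--     cmds = []
--     cmd = None
--     args = []
--     for item in parsed:
--         if item in COMMANDS:
--             if cmd == 'CONFIG':
--                 args.append(item)
--                 continue
--             elif cmd:
--                 cmds.append([cmd] + args)
--             cmd = item
--             args = []
--         else:
--             args.append(item)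
--     if cmd:
--         cmds.append([cmd] + args)
--     return cmds
-- ===== SOURCE B (Python) =====
-- COMMANDS = ['PING', 'ECHO', 'SET', 'GET', 'REPLCONF', 'PSYNC', 'KEYS', 'INFO', 'CONFIG', 'WAIT', 'TYPE', 'XADD', 'REDIS0011']
--
-- def split_cmd(parsed):
--     # Collect the indices where commands start; a CONFIG boundary ends the scan,
--     # so the CONFIG group swallows the rest of the token stream.
--     boundaries = []
--     for i, item in enumerate(parsed):
--         if item in COMMANDS:
--             boundaries.append(i)
--             if item == 'CONFIG':
--                 break
--     # Each group is the slice from one boundary to the next (last one to the end).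
--     groups = []
--     for j, start in enumerate(boundaries):
--         end = boundaries[j + 1] if j + 1 < len(boundaries) else len(parsed)
--         groups.append(parsed[start:end])
--     return groups
-- ===== Notes on version B (the rewrite author's own statement) =====
-- stated objective: alternative
-- what changed: Replaces A's single-pass running (cmd, args) accumulator with a two-phase index/slice decomposition: first collect command boundary indices (stopping at CONFIG), then emit slices between consecutive boundaries.
import Mathlib
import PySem

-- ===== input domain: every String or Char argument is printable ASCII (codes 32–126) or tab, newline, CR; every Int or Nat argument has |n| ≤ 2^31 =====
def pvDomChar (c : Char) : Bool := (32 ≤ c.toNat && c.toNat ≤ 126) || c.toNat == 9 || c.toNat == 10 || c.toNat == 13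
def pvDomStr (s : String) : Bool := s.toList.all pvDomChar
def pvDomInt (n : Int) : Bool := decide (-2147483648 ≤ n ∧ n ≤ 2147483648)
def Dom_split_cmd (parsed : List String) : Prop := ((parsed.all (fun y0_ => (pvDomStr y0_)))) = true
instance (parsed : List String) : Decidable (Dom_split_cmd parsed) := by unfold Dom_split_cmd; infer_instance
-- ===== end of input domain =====

-- B groups by first collecting command-boundary indices (stopping at CONFIG) and slicing
-- between consecutive boundaries, instead of A's running (cmd, args) accumulator; objective: alternative decomposition.

def pyCOMMANDS : List String :=
  ["PING", "ECHO", "SET", "GET", "REPLCONF", "PSYNC", "KEYS", "INFO", "CONFIG", "WAIT", "TYPE", "XADD", "REDIS0011"]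

-- ===== PORT A =====
-- loop body; Python's `elif cmd:` is a non-None test here: cmd is only ever None or a
-- (nonempty) element of COMMANDS, so truthiness coincides with `some _`.
def splitStep (st : List (List String) × Option String × List String) (item : String) :
    List (List String) × Option String × List String :=
  let (cmds, cmd, args) := st
  if item ∈ pyCOMMANDS then
    if cmd = some "CONFIG" then (cmds, cmd, args ++ [item])
    else ((match cmd with
           | some c => cmds ++ [c :: args]
           | none => cmds), some item, ([] : List String))
  else (cmds, cmd, args ++ [item])

-- the trailing `if cmd: cmds.append([cmd] + args)`
def finA (st : List (List String) × Option String × List String) : List (List String) :=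
  match st with
  | (cmds, some c, args) => cmds ++ [c :: args]
  | (cmds, none, _) => cmds

def split_cmd (parsed : List String) : List (List String) :=
  finA (parsed.foldl splitStep ([], none, []))

-- ===== PORT B =====
-- first loop of Source B: indices of command tokens, breaking right after a CONFIG boundary
def collectBoundaries : List String → Nat → List Nat
  | [], _ => []
  | item :: rest, i =>
      if item ∈ pyCOMMANDS then
        if item = "CONFIG" then [i]
        else i :: collectBoundaries rest (i + 1)
      else collectBoundaries rest (i + 1)

-- second loop of Source B: parsed[start:end], end = next boundary or len(parsed)
def sliceGroups (parsed : List String) : List Nat → List (List String)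
  | [] => []
  | [b] => [PySem.List.slice parsed (some (b : Int)) (some (parsed.length : Int))]
  | b :: b' :: bs =>
      PySem.List.slice parsed (some (b : Int)) (some ((b' : Nat) : Int)) :: sliceGroups parsed (b' :: bs)

def split_cmd_alt (parsed : List String) : List (List String) :=
  sliceGroups parsed (collectBoundaries parsed 0)

-- ===== PRECONDITION & SPEC =====
def Spec_split_cmd (parsed : List String) (out : List (List String)) : Prop := out = split_cmd_alt parsed
instance (parsed : List String) (out : List (List String)) : Decidable (Spec_split_cmd parsed out) := by unfold Spec_split_cmd; infer_instance

-- ===== CLAIM (what is proved, stated in full; the proofs are below) =====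
def Claim_equal_split_cmd : Prop := ∀ (parsed : List String), Dom_split_cmd parsed → Spec_split_cmd parsed (split_cmd parsed)

-- ===== LEMMAS AND PROOFS =====

-- common recursive characterisation of the grouping
def grp (c : String) (args : List String) : List String → List (List String)
  | [] => [c :: args]
  | y :: ys =>
      if y ∈ pyCOMMANDS then
        (c :: args) :: (if y = "CONFIG" then ["CONFIG" :: ys] else grp y [] ys)
      else grp c (args ++ [y]) ys

def specG : List String → List (List String)
  | [] => []
  | x :: xs =>
      if x ∈ pyCOMMANDS then
        (if x = "CONFIG" then ["CONFIG" :: xs] else grp x [] xs)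
      else specG xs

-- ---- A = specG ----
theorem A_config (rest : List String) : ∀ cmds args,
    finA (rest.foldl splitStep (cmds, some "CONFIG", args)) = cmds ++ ["CONFIG" :: (args ++ rest)] := by
  induction rest with
  | nil => intro cmds args; simp [finA]
  | cons x rest ih =>
      intro cmds args
      by_cases hx : x ∈ pyCOMMANDS <;>
        simp [List.foldl_cons, splitStep, hx, ih]

theorem A_cmd (rest : List String) : ∀ cmds c args, c ≠ "CONFIG" →
    finA (rest.foldl splitStep (cmds, some c, args)) = cmds ++ grp c args rest := by
  induction rest with
  | nil => intro cmds c args _; simp [finA, grp]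
  | cons x rest ih =>
      intro cmds c args hc
      by_cases hx : x ∈ pyCOMMANDS
      · by_cases hxc : x = "CONFIG"
        · subst hxc
          simp [List.foldl_cons, splitStep, hx, hc, A_config, grp]
        · simp [List.foldl_cons, splitStep, hx, hc, ih _ _ _ hxc, grp, hxc]
      · simp [List.foldl_cons, splitStep, hx, ih _ _ _ hc, grp]

theorem A_none (rest : List String) : ∀ args,
    finA (rest.foldl splitStep ([], none, args)) = specG rest := by
  induction rest with
  | nil => intro args; simp [finA, specG]
  | cons x rest ih =>
      intro args
      by_cases hx : x ∈ pyCOMMANDS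
      · by_cases hxc : x = "CONFIG"
        · subst hxc
          simp [List.foldl_cons, splitStep, hx, A_config, specG]
        · simp [List.foldl_cons, splitStep, hx, A_cmd rest [] x [] hxc, specG, hxc]
      · simp [List.foldl_cons, splitStep, hx, ih, specG]

-- ---- slice facts ----
theorem slice_mid (P mid rest : List String) (c : String) (n : Nat)
    (hn : n = P.length + 1 + mid.length) :
    PySem.List.slice (P ++ c :: (mid ++ rest)) (some (P.length : Int)) (some (n : Int)) = c :: mid := by
  subst hn
  rw [PySem.List.slice_natCast]
  have h1 : (P ++ c :: (mid ++ rest)).drop P.length = c :: (mid ++ rest) := by simp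
  have h2 : P.length + 1 + mid.length - P.length = mid.length + 1 := by omega
  rw [h1, h2]
  simp

theorem slice_drop_at (P rest : List String) (n : Nat) (hn : n = P.length) :
    PySem.List.slice (P ++ rest) (some (n : Int)) (some (((P ++ rest).length : Nat) : Int)) = rest := by
  subst hn
  rw [PySem.List.slice_natCast, List.drop_left]
  exact List.take_of_length_le (by simp)

-- ---- B = specG ----
theorem B_grp (ys : List String) : ∀ (pre mid : List String) (c : String) (n : Nat),
    n = pre.length + 1 + mid.length →
    sliceGroups (pre ++ c :: (mid ++ ys)) (pre.length :: collectBoundaries ys n) = grp c mid ys := by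
  induction ys with
  | nil =>
      intro pre mid c n hn
      simp only [collectBoundaries, sliceGroups, grp, List.append_nil]
      exact congrArg (fun l => [l]) (slice_drop_at pre (c :: mid) pre.length rfl)
  | cons y ys ih =>
      intro pre mid c n hn
      by_cases hy : y ∈ pyCOMMANDS
      · by_cases hyc : y = "CONFIG"
        · subst hyc
          simp only [collectBoundaries, hy, if_true]
          simp only [sliceGroups]
          rw [slice_mid pre mid ("CONFIG" :: ys) c n hn]
          rw [show pre ++ c :: (mid ++ "CONFIG" :: ys) = (pre ++ c :: mid) ++ "CONFIG" :: ys by simp]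
          rw [slice_drop_at (pre ++ c :: mid) ("CONFIG" :: ys) n (by simp [hn]; omega)]
          simp [grp, hy]
        · simp only [collectBoundaries, hy, if_true, if_neg hyc]
          simp only [sliceGroups]
          rw [slice_mid pre mid (y :: ys) c n hn]
          have htail := ih (pre ++ c :: mid) [] y (n + 1) (by simp [hn]; omega)
          rw [show (pre ++ c :: mid).length = n by simp [hn]; omega] at htail
          simp only [List.nil_append, List.append_assoc, List.cons_append] at htail
          rw [htail]
          simp [grp, hy, hyc]
      · simp only [collectBoundaries, hy, if_false]
        have := ih pre (mid ++ [y]) c (n + 1) (by simp [hn]; omega)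
        simp only [List.append_assoc, List.cons_append, List.nil_append] at this
        simpa [grp, hy] using this

theorem B_spec (xs : List String) : ∀ pre : List String,
    sliceGroups (pre ++ xs) (collectBoundaries xs pre.length) = specG xs := by
  induction xs with
  | nil => intro pre; simp [collectBoundaries, sliceGroups, specG]
  | cons x xs ih =>
      intro pre
      by_cases hx : x ∈ pyCOMMANDS
      · by_cases hxc : x = "CONFIG"
        · subst hxc
          simp only [collectBoundaries, hx, if_true]
          simp only [sliceGroups]
          rw [slice_drop_at pre ("CONFIG" :: xs) pre.length rfl]
          simp [specG, hx]
        · simp only [collectBoundaries, hx, if_true, if_neg hxc]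
          have := B_grp xs pre [] x (pre.length + 1) (by simp)
          simp only [List.nil_append] at this
          rw [this]
          simp [specG, hx, hxc]
      · simp only [collectBoundaries, hx, if_false]
        have := ih (pre ++ [x])
        rw [show (pre ++ [x]).length = pre.length + 1 by simp] at this
        simp only [List.append_assoc, List.cons_append, List.nil_append] at this
        rw [this]
        simp [specG, hx]

-- ===== VERDICT (by name: the statement is the Claim_ definition above) =====
theorem split_cmd_spec : Claim_equal_split_cmd := by
  intro parsed _
  show split_cmd parsed = split_cmd_alt parsed
  have hA : split_cmd parsed = specG parsed := A_none parsed []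
  have hB : split_cmd_alt parsed = specG parsed := by
    have := B_spec parsed []
    simpa [split_cmd_alt] using this
  rw [hA, hB]
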